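-- pv_equiv track=rewrite | github.com/jgilles23/projectEuler | pe175.py | tree_zipped
-- ===== SOURCE A (Python) =====
-- def tree_zipped(product, pair, zipped):
--     # Take in the product to this point, a pair, zip
--     # Return the completed product
--     if len(zipped) == 0:
--         return product * (pair[0] * pair[1] + 1)
--     new_pair = zipped[0]
--     total = 0
--     #Split into 0 side
--     total += tree_zipped(product*pair[0], (new_pair[0] + 1, new_pair[1]), zipped[1:])
--     #Split into 1
--     total += tree_zipped(product*(pair[0]*(pair[1] - 1) + 1), new_pair, zipped[1:])
--     return total
-- ===== SOURCE B (Python) =====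
-- def tree_zipped(product, pair, zipped):
--     # Bottom-up DP: at each level the two child pairs depend only on that
--     # level's zipped entry, and the incoming product factors out linearly,
--     # so one backward pass over zipped (O(n) instead of O(2^n)) suffices.
--     def leaf(a, b):
--         return a * b + 1
--     def step(a, b, g1, g2):
--         return a * g1 + (a * (b - 1) + 1) * g2
--     acc = None
--     for w in reversed(zipped):
--         if acc is None:
--             acc = (leaf(w[0] + 1, w[1]), leaf(w[0], w[1]))
--         else:
--             g1, g2 = acc
--             acc = (step(w[0] + 1, w[1], g1, g2), step(w[0], w[1], g1, g2))
--     if acc is None: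
--         return product * leaf(pair[0], pair[1])
--     g1, g2 = acc
--     return product * step(pair[0], pair[1], g1, g2)
-- ===== Notes on version B (the rewrite author's own statement) =====
-- stated objective: faster
-- what changed: Replaced the exponential binary recursion with a single backward O(n) pass: the two child pairs at each level depend only on that level's zipped entry, and the incoming product factors out linearly, so only two subtree values per level need to be maintained.
-- outside the precondition, e.g. on tree_zipped(1, (2,), []): A raises IndexError, B raises IndexError
import Mathlib
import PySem

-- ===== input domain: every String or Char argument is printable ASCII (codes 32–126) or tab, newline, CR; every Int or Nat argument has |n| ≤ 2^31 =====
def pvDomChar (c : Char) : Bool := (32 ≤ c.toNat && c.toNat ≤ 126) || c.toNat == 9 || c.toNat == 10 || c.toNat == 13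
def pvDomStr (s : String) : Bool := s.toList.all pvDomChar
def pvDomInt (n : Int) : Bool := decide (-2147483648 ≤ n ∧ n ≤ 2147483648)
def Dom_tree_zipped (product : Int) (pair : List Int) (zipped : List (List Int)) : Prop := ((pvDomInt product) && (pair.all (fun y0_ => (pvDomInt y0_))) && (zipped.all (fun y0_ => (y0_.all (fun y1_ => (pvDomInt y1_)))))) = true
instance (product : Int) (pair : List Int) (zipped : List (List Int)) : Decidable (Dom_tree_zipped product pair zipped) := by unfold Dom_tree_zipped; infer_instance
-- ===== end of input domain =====

-- B replaces A's exponential binary recursion by one backward O(n) pass (proved equal on Pre_).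

-- ===== PORT A =====
-- pair[0]/pair[1]/zipped[0][i] use constant nonnegative indices, so List.getD is exact
-- wherever Python returns; out-of-range access (IndexError) is excluded by Pre_.
def tree_zipped (product : Int) (pair : List Int) (zipped : List (List Int)) : Int :=
  match zipped with
  | [] => product * (pair.getD 0 0 * pair.getD 1 0 + 1)
  | new_pair :: rest =>
      tree_zipped (product * pair.getD 0 0) [new_pair.getD 0 0 + 1, new_pair.getD 1 0] rest
      + tree_zipped (product * (pair.getD 0 0 * (pair.getD 1 0 - 1) + 1)) new_pair rest

-- ===== PORT B =====
def pvLeaf (a b : Int) : Int := a * b + 1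

def pvStep (a b g1 g2 : Int) : Int := a * g1 + (a * (b - 1) + 1) * g2

def pvLoop (zipped : List (List Int)) : Option (Int × Int) :=
  zipped.reverse.foldl
    (fun acc w =>
      match acc with
      | none => some (pvLeaf (w.getD 0 0 + 1) (w.getD 1 0), pvLeaf (w.getD 0 0) (w.getD 1 0))
      | some (g1, g2) =>
          some (pvStep (w.getD 0 0 + 1) (w.getD 1 0) g1 g2, pvStep (w.getD 0 0) (w.getD 1 0) g1 g2))
    none

def tree_zipped_alt (product : Int) (pair : List Int) (zipped : List (List Int)) : Int :=
  match pvLoop zipped with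
  | none => product * pvLeaf (pair.getD 0 0) (pair.getD 1 0)
  | some (g1, g2) => product * pvStep (pair.getD 0 0) (pair.getD 1 0) g1 g2

-- ===== PRECONDITION & SPEC =====
-- Pre_ excludes exactly the inputs on which Python A raises IndexError:
-- pair or some element of zipped shorter than 2.
def Pre_tree_zipped (product : Int) (pair : List Int) (zipped : List (List Int)) : Prop :=
  2 ≤ pair.length ∧ ∀ w ∈ zipped, 2 ≤ w.length
instance (product : Int) (pair : List Int) (zipped : List (List Int)) : Decidable (Pre_tree_zipped product pair zipped) := by unfold Pre_tree_zipped; infer_instance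

def pvWitness_tree_zipped : Int × List Int × List (List Int) := (1, [2, 3], [[1, 2], [0, 1]])

def Spec_tree_zipped (product : Int) (pair : List Int) (zipped : List (List Int)) (out : Int) : Prop := out = tree_zipped_alt product pair zipped
instance (product : Int) (pair : List Int) (zipped : List (List Int)) (out : Int) : Decidable (Spec_tree_zipped product pair zipped out) := by unfold Spec_tree_zipped; infer_instance

-- ===== CLAIM (what is proved, stated in full; the proofs are below) =====
def Claim_equal_tree_zipped : Prop := ∀ (product : Int) (pair : List Int) (zipped : List (List Int)), Dom_tree_zipped product pair zipped → Pre_tree_zipped product pair zipped → Spec_tree_zipped product pair zipped (tree_zipped product pair zipped)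

-- ===== LEMMAS AND PROOFS =====

-- the product argument factors out of A linearly
theorem tree_zipped_mul (product : Int) (pair : List Int) (zipped : List (List Int)) :
    tree_zipped product pair zipped = product * tree_zipped 1 pair zipped := by
  induction zipped generalizing product pair with
  | nil => simp only [tree_zipped]; ring
  | cons w rest ih =>
      simp only [tree_zipped]
      rw [ih (product * pair.getD 0 0), ih (product * (pair.getD 0 0 * (pair.getD 1 0 - 1) + 1)),
          ih (1 * pair.getD 0 0), ih (1 * (pair.getD 0 0 * (pair.getD 1 0 - 1) + 1))]
      ring

theorem pvLoop_cons (w : List Int) (rest : List (List Int)) :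
    pvLoop (w :: rest) =
      match pvLoop rest with
      | none => some (pvLeaf (w.getD 0 0 + 1) (w.getD 1 0), pvLeaf (w.getD 0 0) (w.getD 1 0))
      | some (g1, g2) =>
          some (pvStep (w.getD 0 0 + 1) (w.getD 1 0) g1 g2, pvStep (w.getD 0 0) (w.getD 1 0) g1 g2) := by
  simp [pvLoop, List.foldl_reverse]

theorem alt_eq_one (pair : List Int) (zipped : List (List Int)) :
    tree_zipped_alt 1 pair zipped = tree_zipped 1 pair zipped := by
  induction zipped generalizing pair with
  | nil =>
      simp [tree_zipped_alt, pvLoop, tree_zipped, pvLeaf]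
  | cons w rest ih =>
      have h1 := ih [w.getD 0 0 + 1, w.getD 1 0]
      have h2 := ih w
      simp only [tree_zipped_alt, pvLoop_cons] at h1 h2 ⊢
      rw [show tree_zipped 1 pair (w :: rest)
            = tree_zipped (1 * pair.getD 0 0) [w.getD 0 0 + 1, w.getD 1 0] rest
              + tree_zipped (1 * (pair.getD 0 0 * (pair.getD 1 0 - 1) + 1)) w rest from rfl,
          tree_zipped_mul (1 * pair.getD 0 0),
          tree_zipped_mul (1 * (pair.getD 0 0 * (pair.getD 1 0 - 1) + 1)), ← h1, ← h2]
      cases hr : pvLoop rest with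
      | none =>
          simp only [pvStep, pvLeaf, List.getD_cons_zero, List.getD_cons_succ]
          ring
      | some g =>
          obtain ⟨g1, g2⟩ := g
          simp only [pvStep, pvLeaf, List.getD_cons_zero, List.getD_cons_succ]
          ring

theorem alt_mul (product : Int) (pair : List Int) (zipped : List (List Int)) :
    tree_zipped_alt product pair zipped = product * tree_zipped_alt 1 pair zipped := by
  unfold tree_zipped_alt
  cases pvLoop zipped with
  | none => ring
  | some g => obtain ⟨g1, g2⟩ := g; ring

-- ===== VERDICT (by name: the statement is the Claim_ definition above) =====
theorem tree_zipped_spec : Claim_equal_tree_zipped := by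
  intro product pair zipped _ _
  unfold Spec_tree_zipped
  rw [tree_zipped_mul, alt_mul, alt_eq_one]
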